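-- pv_equiv track=rewrite | github.com/ChesnakovKonstantin/Test-Example | Python projects/PythonApplication1/PythonApplication2/PythonApplication2.py | eq_signs
-- ===== SOURCE A (Python) =====
-- def eq_signs(a):
--     if (a[0]<0):
--         for el in a:
--             if (el>0 or el == 0):
--                 return False
--     elif (a[0] > 0):
--         for el in a:
--             if (el<0 or el == 0):
--                 return False
--     else:
--         return False
--     return True
-- ===== SOURCE B (Python) =====
-- def eq_signs(a):
--     lo = hi = a[0]
--     for el in a:
--         lo = min(lo, el)
--         hi = max(hi, el)
--     return lo > 0 or hi < 0
-- ===== Notes on version B (the rewrite author's own statement) =====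
-- stated objective: alternative
-- what changed: Replaces A's two sign-branched early-return loops with a single running min/max fold followed by one final comparison of the minimum and maximum against zero.
import Mathlib
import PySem

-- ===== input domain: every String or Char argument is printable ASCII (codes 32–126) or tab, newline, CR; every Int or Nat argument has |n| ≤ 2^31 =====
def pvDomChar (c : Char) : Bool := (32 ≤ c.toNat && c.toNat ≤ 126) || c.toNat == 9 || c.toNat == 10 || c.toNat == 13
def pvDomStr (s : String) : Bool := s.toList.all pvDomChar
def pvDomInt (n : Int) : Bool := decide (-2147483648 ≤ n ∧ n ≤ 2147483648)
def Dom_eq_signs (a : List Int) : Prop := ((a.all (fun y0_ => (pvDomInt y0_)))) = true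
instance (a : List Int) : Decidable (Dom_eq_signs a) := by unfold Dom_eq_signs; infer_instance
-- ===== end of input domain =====

-- B replaces A's two sign-branched early-return loops by one running min/max fold; return value only.

-- ===== PORT A =====
-- loop 'for el in a: if el>0 or el==0: return False' (taken when a[0]<0)
def eqSignsLoopNeg : List Int → Bool
  | [] => true
  | el :: rest => if el > 0 || el == 0 then false else eqSignsLoopNeg rest

-- loop 'for el in a: if el<0 or el==0: return False' (taken when a[0]>0)
def eqSignsLoopPos : List Int → Bool
  | [] => true
  | el :: rest => if el < 0 || el == 0 then false else eqSignsLoopPos rest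

def eq_signs (a : List Int) : Bool :=
  match PySem.List.pyGet? a 0 with
  | none => false   -- a[0] raises IndexError in Python; excluded by Pre_
  | some h =>
    if h < 0 then eqSignsLoopNeg a
    else if h > 0 then eqSignsLoopPos a
    else false

-- ===== PORT B =====
def eq_signs_alt (a : List Int) : Bool :=
  match PySem.List.pyGet? a 0 with
  | none => false   -- a[0] raises IndexError in Python; excluded by Pre_
  | some h =>
    let p := a.foldl (fun (p : Int × Int) el => (min p.1 el, max p.2 el)) (h, h)
    decide (p.1 > 0) || decide (p.2 < 0)

-- ===== PRECONDITION & SPEC =====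
-- A evaluates a[0], which raises IndexError on the empty list; Pre_ excludes only that.
def Pre_eq_signs (a : List Int) : Prop := a ≠ []
instance (a : List Int) : Decidable (Pre_eq_signs a) := by unfold Pre_eq_signs; infer_instance
def pvWitness_eq_signs : List Int := ([1, 2])

def Spec_eq_signs (a : List Int) (out : Bool) : Prop := out = eq_signs_alt a
instance (a : List Int) (out : Bool) : Decidable (Spec_eq_signs a out) := by unfold Spec_eq_signs; infer_instance

-- ===== CLAIM (what is proved, stated in full; the proofs are below) =====
def Claim_equal_eq_signs : Prop := ∀ (a : List Int), Dom_eq_signs a → Pre_eq_signs a → Spec_eq_signs a (eq_signs a)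

-- ===== LEMMAS AND PROOFS =====

theorem foldl_minmax_split (l : List Int) (lo hi : Int) :
    l.foldl (fun (p : Int × Int) el => (min p.1 el, max p.2 el)) (lo, hi)
      = (l.foldl min lo, l.foldl max hi) := by
  induction l generalizing lo hi with
  | nil => rfl
  | cons x t ih => simp [List.foldl, ih]

theorem foldl_min_pos (l : List Int) (lo : Int) :
    (decide (l.foldl min lo > 0)) = (decide (lo > 0) && l.all (fun el => decide (el > 0))) := by
  induction l generalizing lo with
  | nil => simp
  | cons x t ih =>
    rw [List.foldl_cons, List.all_cons, ih]
    have h : (decide (min lo x > 0)) = (decide (lo > 0) && decide (x > 0)) := by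
      by_cases h1 : lo > 0 <;> by_cases h2 : x > 0 <;> simp [h1, h2]
    rw [h, Bool.and_assoc]

theorem foldl_max_neg (l : List Int) (hi : Int) :
    (decide (l.foldl max hi < 0)) = (decide (hi < 0) && l.all (fun el => decide (el < 0))) := by
  induction l generalizing hi with
  | nil => simp
  | cons x t ih =>
    rw [List.foldl_cons, List.all_cons, ih]
    have h : (decide (max hi x < 0)) = (decide (hi < 0) && decide (x < 0)) := by
      by_cases h1 : hi < 0 <;> by_cases h2 : x < 0 <;> simp [h1, h2]
    rw [h, Bool.and_assoc]

theorem loopNeg_all (l : List Int) :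
    eqSignsLoopNeg l = l.all (fun el => decide (el < 0)) := by
  induction l with
  | nil => rfl
  | cons x t ih =>
    simp only [eqSignsLoopNeg, List.all_cons, ih]
    by_cases hx : x < 0
    · simp [hx, show ¬ x > 0 by omega, show x ≠ 0 by omega]
    · by_cases hz : x = 0
      · simp [hz]
      · simp [hx, show x > 0 by omega]

theorem loopPos_all (l : List Int) :
    eqSignsLoopPos l = l.all (fun el => decide (el > 0)) := by
  induction l with
  | nil => rfl
  | cons x t ih =>
    simp only [eqSignsLoopPos, List.all_cons, ih]
    by_cases hx : x > 0
    · simp [hx, show ¬ x < 0 by omega, show x ≠ 0 by omega]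
    · by_cases hz : x = 0
      · simp [hz]
      · simp [hx, show x < 0 by omega]

-- ===== VERDICT (by name: the statement is the Claim_ definition above) =====
theorem eq_signs_spec : Claim_equal_eq_signs := by
  intro a _ hpre
  unfold Spec_eq_signs eq_signs eq_signs_alt
  match a with
  | [] => exact absurd rfl hpre
  | h :: t =>
    have hget : PySem.List.pyGet? (h :: t) 0 = some h := by
      simp [PySem.List.pyGet?, PySem.List.pyIdx?]
    simp only [hget, foldl_minmax_split, foldl_min_pos, foldl_max_neg]
    by_cases hneg : h < 0
    · simp [hneg, show ¬ h > 0 by omega, loopNeg_all, List.all_cons]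
    · by_cases hpos : h > 0
      · simp [hneg, hpos, loopPos_all, List.all_cons]
      · simp [hneg, hpos]
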